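-- pv_equiv track=rewrite | github.com/irfanahme/tests_assigment | Q1.py | find_sums
-- ===== SOURCE A (Python) =====
-- def find_sums(n):
--     fact = 1
--     num = []
--     sums = 0
--     for i in range(1,n+1):
--         fact*=i
--     num=map(int, str(fact))
--     for i in num:
--         sums+=i
--     return sums
-- ===== SOURCE B (Python) =====
-- def find_sums(n):
--     # n! via divide-and-conquer binary splitting: prod(lo, hi) multiplies two
--     # balanced halves, so the big operands meet only O(log n) times (much less
--     # long-number work than A's one-by-one fold), then sum the decimal digits.
--     def prod(lo, hi):
--         if lo > hi:
--             return 1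
--         if lo == hi:
--             return lo
--         mid = (lo + hi) // 2
--         return prod(lo, mid) * prod(mid + 1, hi)
--     fact = prod(1, n)
--     return sum(ord(c) - 48 for c in str(fact))
-- ===== Notes on version B (the rewrite author's own statement) =====
-- stated objective: alternative
-- what changed: B builds n! by a recursive divide-and-conquer (binary-splitting) product of balanced halves instead of A's linear left fold multiplying one factor at a time, then sums the decimal digits of str(fact) arithmetically from the character codes.
import Mathlib
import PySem

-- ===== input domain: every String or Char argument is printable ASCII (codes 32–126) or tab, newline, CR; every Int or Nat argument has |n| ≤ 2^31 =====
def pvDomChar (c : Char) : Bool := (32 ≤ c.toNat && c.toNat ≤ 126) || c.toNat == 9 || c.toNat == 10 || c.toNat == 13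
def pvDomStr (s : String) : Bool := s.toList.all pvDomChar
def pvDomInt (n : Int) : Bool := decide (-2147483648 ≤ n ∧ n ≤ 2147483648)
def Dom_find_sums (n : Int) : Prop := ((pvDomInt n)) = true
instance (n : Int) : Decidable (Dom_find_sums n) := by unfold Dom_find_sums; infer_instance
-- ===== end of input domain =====

-- B builds n! by a recursive divide-and-conquer (binary-splitting) product instead of A's linear fold.


-- ===== PORT A =====
def find_sums (n : Int) : Int :=
  let fact := (PySem.List.pyRange 1 (n + 1) 1).foldl (fun fact i => fact * i) 1
  -- num = map(int, str(fact)); int(c) on a single decimal digit character is c.toNat - 48,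
  -- exact here since str(fact) of fact ≥ 1 consists of digit characters only
  let num := (PySem.Int.toChars fact).map (fun c => ((c.toNat : Int) - 48))
  num.foldl (fun sums i => sums + i) 0

-- ===== PORT B =====
-- prod(lo, hi): the divide-and-conquer product of lo..hi (1 when lo > hi)
def pvProd (lo hi : Int) : Int :=
  if lo > hi then 1
  else if lo = hi then lo
  else
    let mid := PySem.Int.floordiv (lo + hi) 2
    pvProd lo mid * pvProd (mid + 1) hi
termination_by (hi - lo).toNat
decreasing_by
  all_goals
    simp only [PySem.Int.floordiv_eq_ediv_of_pos (by norm_num : (0:Int) < 2)]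
    omega

def find_sums_alt (n : Int) : Int :=
  let fact := pvProd 1 n
  -- sum(ord(c) - 48 for c in str(fact))
  ((PySem.Int.toChars fact).map (fun c => ((c.toNat : Int) - 48))).sum

-- ===== PRECONDITION & SPEC =====
def Spec_find_sums (n : Int) (out : Int) : Prop := out = find_sums_alt n
instance (n : Int) (out : Int) : Decidable (Spec_find_sums n out) := by unfold Spec_find_sums; infer_instance

-- ===== CLAIM (what is proved, stated in full; the proofs are below) =====
def Claim_equal_find_sums : Prop := ∀ (n : Int), Dom_find_sums n → Spec_find_sums n (find_sums n)

-- ===== LEMMAS AND PROOFS =====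

lemma pv_foldl_mul_acc (l : List Int) : ∀ a b : Int,
    l.foldl (fun f i => f * i) (a * b) = a * l.foldl (fun f i => f * i) b := by
  induction l with
  | nil => intro a b; simp
  | cons j l ih => intro a b; simp only [List.foldl_cons]; rw [mul_assoc, ih]

-- the binary-splitting product equals the left fold over the same range
lemma pv_prod_eq (lo hi : Int) :
    pvProd lo hi = (PySem.List.pyRange lo (hi + 1) 1).foldl (fun f i => f * i) 1 := by
  induction lo, hi using pvProd.induct with
  | case1 lo hi h =>
    rw [pvProd, if_pos h, PySem.List.pyRange_one_eq_nil (by omega)]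
    simp
  | case2 lo h =>
    rw [pvProd, if_neg h, if_pos rfl, PySem.List.pyRange_one_singleton]
    simp
  | case3 lo hi h he mid ih1 ih2 =>
    rw [pvProd, if_neg h, if_neg he]
    show pvProd lo mid * pvProd (mid + 1) hi = _
    have hm : mid = (lo + hi) / 2 := by
      show PySem.Int.floordiv (lo + hi) 2 = (lo + hi) / 2
      rw [PySem.Int.floordiv_eq_ediv_of_pos (by norm_num : (0:Int) < 2)]
    have hbound : lo ≤ mid ∧ mid < hi := by
      constructor <;> (rw [hm]; omega)
    rw [PySem.List.pyRange_one_append lo (mid + 1) (hi + 1) (by omega) (by omega),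
        List.foldl_append, ih1, ih2]
    have : (PySem.List.pyRange lo (mid + 1) 1).foldl (fun f i => f * i) 1
             * (PySem.List.pyRange (mid + 1) (hi + 1) 1).foldl (fun f i => f * i) 1
           = (PySem.List.pyRange (mid + 1) (hi + 1) 1).foldl (fun f i => f * i)
               ((PySem.List.pyRange lo (mid + 1) 1).foldl (fun f i => f * i) 1) := by
      rw [← mul_one ((PySem.List.pyRange lo (mid + 1) 1).foldl (fun f i => f * i) 1),
          pv_foldl_mul_acc, mul_one]
    rw [this]

lemma pv_foldl_add_id (l : List Int) : ∀ a : Int, l.foldl (fun s i => s + i) a = a + l.sum := by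
  induction l with
  | nil => simp
  | cons x xs ih => intro a; simp [List.foldl_cons, ih, add_assoc]

-- ===== VERDICT (by name: the statement is the Claim_ definition above) =====
theorem find_sums_spec : Claim_equal_find_sums := by
  intro n _
  unfold Spec_find_sums find_sums find_sums_alt
  simp only []
  rw [pv_prod_eq 1 n, pv_foldl_add_id, zero_add]
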